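-- pv_equiv track=rewrite | github.com/capeliu/isan | isan/tagging/inc_segger.py | actions_to_result
-- ===== SOURCE A (Python) =====
-- def actions_to_result(actions,raw):
--     sen=[]
--     cache=''
--     for c,a in zip(raw,actions[1:]):
--         cache+=c
--         if a=='s':
--             sen.append(cache)
--             cache=''
--     if cache:
--         sen.append(cache)
--     return sen
-- ===== SOURCE B (Python) =====
-- def actions_to_result(actions, raw):
--     # Two staged passes: collect cut positions first, then slice raw between
--     # consecutive boundaries (instead of accumulating a character cache).
--     pairs = list(zip(raw, actions[1:]))
--     n = len(pairs)
--     bounds = [0] + [i + 1 for i, (c, a) in enumerate(pairs) if a == 's']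
--     if bounds[-1] != n:
--         bounds.append(n)
--     return [raw[a:b] for a, b in zip(bounds, bounds[1:])]
-- ===== Notes on version B (the rewrite author's own statement) =====
-- stated objective: alternative
-- what changed: B replaces A's single pass with a growing character cache by two staged passes: it first computes the list of cut positions from the (char, action) pairs, forms a boundary list (appending the end only when a trailing partial word exists), and then slices raw between consecutive boundaries.
import Mathlib
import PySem

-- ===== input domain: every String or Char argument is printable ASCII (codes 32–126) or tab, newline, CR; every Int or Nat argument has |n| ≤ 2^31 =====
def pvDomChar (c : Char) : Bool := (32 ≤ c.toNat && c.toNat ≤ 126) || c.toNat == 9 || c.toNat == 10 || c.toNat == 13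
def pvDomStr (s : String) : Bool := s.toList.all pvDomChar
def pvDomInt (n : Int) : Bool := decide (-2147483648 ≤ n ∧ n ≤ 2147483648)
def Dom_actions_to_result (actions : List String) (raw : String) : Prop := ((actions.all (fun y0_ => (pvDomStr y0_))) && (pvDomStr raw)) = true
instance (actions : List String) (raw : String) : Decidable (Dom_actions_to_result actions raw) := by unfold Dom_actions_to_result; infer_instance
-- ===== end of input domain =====

-- B computes cut positions first and then slices raw between consecutive boundaries,
-- instead of A's single pass with a growing character cache (same cost, staged passes).


-- ===== PORT A =====
-- A's `if cache: sen.append(cache)` finalisation (cache kept as List Char)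
def pvFlush (st : List String × List Char) : List String :=
  if st.2.isEmpty then st.1 else st.1 ++ [String.ofList st.2]

-- one iteration of A's loop body: cache += c; if a == 's': sen.append(cache); cache = ''
def pvStepA (st : List String × List Char) (p : Char × String) : List String × List Char :=
  if p.2 == "s" then (st.1 ++ [String.ofList (st.2 ++ [p.1])], []) else (st.1, st.2 ++ [p.1])

-- actions[1:] is List.drop 1 (exact for a nonnegative slice start); zip truncates like Python's
def actions_to_result (actions : List String) (raw : String) : List String :=
  pvFlush ((List.zip raw.toList (actions.drop 1)).foldl pvStepA ([], []))

-- ===== PORT B =====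
-- pairs = list(zip(raw, actions[1:])); n = len(pairs)
-- bounds = [0] + [i+1 for i,(c,a) in enumerate(pairs) if a=='s']
-- if bounds[-1] != n: bounds.append(n)
-- return [raw[a:b] for a,b in zip(bounds, bounds[1:])]
def actions_to_result_alt (actions : List String) (raw : String) : List String :=
  let pairs := List.zip raw.toList (actions.drop 1)
  let n : Int := pairs.length
  let bounds0 : List Int :=
    0 :: (PySem.List.enumerate pairs 0).filterMap
          (fun p => if p.2.2 == "s" then some (p.1 + 1) else none)
  let bounds := if PySem.List.pyGetD bounds0 (-1) 0 ≠ n then bounds0 ++ [n] else bounds0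
  (bounds.zip (bounds.drop 1)).map
    (fun ab => String.ofList (PySem.List.slice raw.toList (some ab.1) (some ab.2)))

-- ===== PRECONDITION & SPEC =====
def Spec_actions_to_result (actions : List String) (raw : String) (out : List String) : Prop := out = actions_to_result_alt actions raw
instance (actions : List String) (raw : String) (out : List String) : Decidable (Spec_actions_to_result actions raw out) := by unfold Spec_actions_to_result; infer_instance

-- ===== CLAIM (what is proved, stated in full; the proofs are below) =====
def Claim_equal_actions_to_result : Prop := ∀ (actions : List String) (raw : String), Dom_actions_to_result actions raw → Spec_actions_to_result actions raw (actions_to_result actions raw)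

-- ===== LEMMAS AND PROOFS =====
-- common characterisation of A's loop: segment the pair list left-to-right with an explicit cache
def segAux (cache : List Char) : List (Char × String) → List String
  | [] => if cache.isEmpty then [] else [String.ofList cache]
  | (c, a) :: ps => if a == "s" then String.ofList (cache ++ [c]) :: segAux [] ps
                    else segAux (cache ++ [c]) ps

theorem lemA (ps : List (Char × String)) :
    ∀ (sen : List String) (cache : List Char),
      pvFlush (ps.foldl pvStepA (sen, cache)) = sen ++ segAux cache ps := by
  induction ps with
  | nil =>
      intro sen cache
      simp only [List.foldl_nil, pvFlush, segAux]
      by_cases h : cache.isEmpty <;> simp [h]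
  | cons p ps ih =>
      intro sen cache
      obtain ⟨c, a⟩ := p
      by_cases h : a == "s" <;>
        simp [List.foldl_cons, pvStepA, segAux, h, ih]

-- the Nat-valued cut positions of the pair list, indices counted from q
def cutsN (q : Nat) : List (Char × String) → List Nat
  | [] => []
  | (_, a) :: ps => if a == "s" then (q + 1) :: cutsN (q + 1) ps else cutsN (q + 1) ps

-- adjacent-slices over Nat boundaries
def adjN (l : List Char) : List Nat → List String
  | a :: b :: rest => String.ofList ((l.drop a).take (b - a)) :: adjN l (b :: rest)
  | _ => []

theorem cuts_eq (ps : List (Char × String)) :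
    ∀ q : Nat,
      (PySem.List.enumerate ps (Int.ofNat q)).filterMap
          (fun p => if p.2.2 == "s" then some (p.1 + 1) else none)
        = (cutsN q ps).map Int.ofNat := by
  induction ps with
  | nil => intro q; rw [PySem.List.enumerate_nil]; rfl
  | cons p ps ih =>
      intro q
      obtain ⟨c, a⟩ := p
      rw [PySem.List.enumerate_cons, List.filterMap_cons,
        show Int.ofNat q + 1 = Int.ofNat (q + 1) from rfl, ih (q + 1)]
      by_cases h : a == "s" <;> simp [cutsN, h]

theorem adj_eq (l : List Char) :
    ∀ bs : List Nat,
      ((bs.map Int.ofNat).zip ((bs.map Int.ofNat).drop 1)).map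
          (fun ab => String.ofList (PySem.List.slice l (some ab.1) (some ab.2)))
        = adjN l bs := by
  intro bs
  induction bs with
  | nil => rfl
  | cons a bs ih =>
      cases bs with
      | nil => rfl
      | cons b rest =>
          simp only [List.map_cons, List.drop_succ_cons, List.drop_zero,
            List.zip_cons_cons, List.map] at ih ⊢
          rw [show PySem.List.slice l (some (Int.ofNat a)) (some (Int.ofNat b))
                = (l.drop a).take (b - a) from by exact_mod_cast PySem.List.slice_natCast l a b]
          rw [adjN]
          exact congrArg _ ih

theorem zip_fst_prefix {α β : Type} (xs : List α) :
    ∀ ys : List β, ((xs.zip ys).map Prod.fst) <+: xs := by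
  induction xs with
  | nil => intro ys; simp
  | cons x xs ih =>
      intro ys
      cases ys with
      | nil => simp
      | cons y ys =>
          obtain ⟨t, ht⟩ := ih ys
          exact ⟨t, by simp [ht]⟩

theorem take_step (l : List Char) (p q : Nat) (c : Char) (hpq : p ≤ q) (hc : l[q]? = some c) :
    (l.drop p).take (q - p + 1) = (l.drop p).take (q - p) ++ [c] := by
  rw [List.take_add_one]
  have h2 : (l.drop p)[q - p]? = some c := by
    rw [List.getElem?_drop]
    have h3 : p + (q - p) = q := by omega
    rw [h3, hc]
  simp [h2]

theorem main_lem (l : List Char) :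
    ∀ (ps : List (Char × String)) (p q : Nat), p ≤ q → q ≤ l.length →
      ((ps.map Prod.fst) <+: l.drop q) →
      adjN l (p :: (cutsN q ps ++
          (if (p :: cutsN q ps).getLastD 0 ≠ q + ps.length then [q + ps.length] else [])))
        = segAux ((l.drop p).take (q - p)) ps := by
  intro ps
  induction ps with
  | nil =>
      intro p q hpq hql _
      simp only [cutsN, List.length_nil, Nat.add_zero, List.nil_append, List.getLastD]
      by_cases h : p = q
      · subst h
        simp [adjN, segAux]
      · rw [if_pos (by simpa using h)]
        have hne : ((l.drop p).take (q - p)).isEmpty = false := by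
          simp only [List.isEmpty_eq_false_iff, ← List.length_pos_iff, List.length_take,
            List.length_drop]
          omega
        rw [show adjN l [p, q] = [String.ofList ((l.drop p).take (q - p))] from by
              rw [adjN]; rfl]
        simp [segAux, hne]
  | cons pr ps ih =>
      intro p q hpq hql hpre
      obtain ⟨c, a⟩ := pr
      obtain ⟨t, ht⟩ := hpre
      simp only [List.map_cons, List.cons_append] at ht
      have hlen : 0 < (l.drop q).length := by rw [← ht]; simp
      rw [List.length_drop] at hlen
      have hc : l[q]? = some c := by
        have h0 : (l.drop q)[0]? = some c := by rw [← ht]; rfl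
        rw [List.getElem?_drop, Nat.add_zero] at h0
        exact h0
      have hpre' : (ps.map Prod.fst) <+: l.drop (q + 1) := by
        have hdd : l.drop (q + 1) = (l.drop q).drop 1 := by rw [List.drop_drop]
        rw [hdd, ← ht]
        exact ⟨t, rfl⟩
      have harith : q + ((c, a) :: ps).length = (q + 1) + ps.length := by
        simp only [List.length_cons]; omega
      have htake : (l.drop p).take (q + 1 - p) = (l.drop p).take (q - p) ++ [c] := by
        rw [show q + 1 - p = q - p + 1 by omega]
        exact take_step l p q c hpq hc
      by_cases hs : a == "s"
      · have hcuts : cutsN q ((c, a) :: ps) = (q + 1) :: cutsN (q + 1) ps := by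
          simp [cutsN, hs]
        have hlast : ((p :: (q + 1) :: cutsN (q + 1) ps).getLastD 0)
            = (((q + 1) :: cutsN (q + 1) ps).getLastD 0) := by
          simp only [List.getLastD_cons]
        rw [hcuts, harith, hlast]
        simp only [List.cons_append]
        rw [adjN, htake]
        have hIH := ih (q + 1) (q + 1) (le_refl _) (by omega) hpre'
        simp only [Nat.sub_self, List.take_zero] at hIH
        rw [hIH]
        have hsa : a = "s" := by simpa using hs
        simp [segAux, hsa]
      · have hcuts : cutsN q ((c, a) :: ps) = cutsN (q + 1) ps := by
          simp [cutsN, hs]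
        rw [hcuts, harith]
        have hIH := ih p (q + 1) (by omega) (by omega) hpre'
        rw [hIH, htake]
        have hsa : ¬ a = "s" := by simpa using hs
        simp [segAux, hsa]

theorem getLastD_cast (bs : List Nat) :
    ∀ d : Nat, ((bs.map Int.ofNat).getLastD (Int.ofNat d)) = Int.ofNat (bs.getLastD d) := by
  induction bs with
  | nil => intro d; rfl
  | cons b bs ih => intro d; simp only [List.map_cons, List.getLastD_cons]; exact ih b

theorem getLast_eq_lastD (xs : List Int) (hx : xs ≠ []) : xs.getLast hx = xs.getLastD 0 := by
  cases xs with
  | nil => simp at hx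
  | cons a l => simp [List.getLastD_eq_getLast?, List.getLast?_eq_some_getLast]

-- ===== VERDICT (by name: the statement is the Claim_ definition above) =====
theorem actions_to_result_spec : Claim_equal_actions_to_result := by
  intro actions raw _
  unfold Spec_actions_to_result actions_to_result actions_to_result_alt
  simp only []
  rw [lemA _ [] [], List.nil_append]
  rw [show (0 : Int) = Int.ofNat 0 from rfl]
  rw [cuts_eq (List.zip raw.toList (actions.drop 1)) 0]
  set l := raw.toList with hl
  set ps := List.zip l (actions.drop 1) with hps
  rw [show (Int.ofNat 0) :: (cutsN 0 ps).map Int.ofNat = (0 :: cutsN 0 ps).map Int.ofNat from rfl]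
  rw [PySem.List.pyGetD_neg_one _ _ (by simp)]
  rw [getLast_eq_lastD]
  rw [show (0 : Int) = Int.ofNat 0 from rfl, getLastD_cast]
  have hcond : (Int.ofNat ((0 :: cutsN 0 ps).getLastD 0) ≠ (ps.length : Int))
      ↔ ((0 :: cutsN 0 ps).getLastD 0 ≠ ps.length) := by simp
  have hpre0 : (ps.map Prod.fst) <+: l.drop 0 := by
    rw [List.drop_zero]; exact zip_fst_prefix l (actions.drop 1)
  have hmain := main_lem l ps 0 0 (le_refl _) (by omega) hpre0
  simp only [Nat.zero_add, Nat.sub_self, List.take_zero, List.drop_zero] at hmain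
  by_cases h : (0 :: cutsN 0 ps).getLastD 0 ≠ ps.length
  · rw [if_pos (hcond.mpr h)]
    rw [show ((0 :: cutsN 0 ps).map Int.ofNat) ++ [(ps.length : Int)]
          = ((0 :: cutsN 0 ps) ++ [ps.length]).map Int.ofNat from by simp]
    rw [adj_eq]
    rw [if_pos h] at hmain
    rw [← hmain]
    rfl
  · rw [if_neg (fun hh => h (hcond.mp hh))]
    rw [adj_eq]
    rw [if_neg h, List.append_nil] at hmain
    exact hmain.symm
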